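-- pv_equiv track=rewrite | github.com/shen1994/DeepFaceRecognition-TripleLoss | cnn_generate.py | get_path_prefix
-- ===== SOURCE A (Python) =====
-- def get_path_prefix(path):
--     prefix = ''
--     counter = 0
--     for index in range(len(path)):
--         if (path[index] == '/' or path[index] == '\\'):
--             counter += 1
--         if (path[index] == '/' or path[index] == '\\') and counter == 3:
--             break
--         prefix += path[index]
--     return prefix
-- ===== SOURCE B (Python) =====
-- import re
--
-- def get_path_prefix(path):
--     parts = re.split(r'([/\\])', path)
--     return ''.join(parts[:5])
-- ===== Notes on version B (the rewrite author's own statement) =====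
-- stated objective: idiomatic
-- what changed: Replaces the char-by-char counting loop with re.split on a captured separator group and joining the first five tokens (three fragments + two separators).
import Mathlib
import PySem

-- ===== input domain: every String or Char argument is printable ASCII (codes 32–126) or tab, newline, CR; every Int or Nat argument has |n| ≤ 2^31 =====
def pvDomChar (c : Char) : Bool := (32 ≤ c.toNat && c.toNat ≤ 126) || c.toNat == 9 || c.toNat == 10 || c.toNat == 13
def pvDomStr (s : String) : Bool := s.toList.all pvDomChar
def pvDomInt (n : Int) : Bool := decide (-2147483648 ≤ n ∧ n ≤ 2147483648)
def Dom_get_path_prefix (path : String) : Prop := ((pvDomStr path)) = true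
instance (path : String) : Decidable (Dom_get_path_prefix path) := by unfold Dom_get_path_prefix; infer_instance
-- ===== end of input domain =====

-- ===== PORT A =====
-- A: scan chars, count separators, break before the third one; B: split into
-- fragment/separator tokens and join the first five. Proved equal on Dom (idiomatic rewrite).
def gppLoop (l : List Char) (counter : Nat) (pfx : String) : String :=
  match l with
  | [] => pfx
  | c :: rest =>
    let counter' := if c = '/' ∨ c = '\\' then counter + 1 else counter
    if (c = '/' ∨ c = '\\') ∧ counter' = 3 then pfx
    else gppLoop rest counter' (pfx ++ String.singleton c)

def get_path_prefix (path : String) : String := gppLoop path.toList 0 ""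

-- ===== PORT B =====
-- tokenizer mirroring re.split(r'([/\\])', path): fragments and captured separators, alternating
def gppTokens : List Char → List (List Char)
  | [] => [[]]
  | c :: rest =>
    if c = '/' ∨ c = '\\' then [] :: [c] :: gppTokens rest
    else
      match gppTokens rest with
      | t :: ts => (c :: t) :: ts
      | [] => [[c]]

def get_path_prefix_alt (path : String) : String :=
  String.ofList (((gppTokens path.toList).take 5).flatten)

-- ===== PRECONDITION & SPEC =====
def Spec_get_path_prefix (path : String) (out : String) : Prop := out = get_path_prefix_alt path
instance (path : String) (out : String) : Decidable (Spec_get_path_prefix path out) := by unfold Spec_get_path_prefix; infer_instance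

-- ===== CLAIM (what is proved, stated in full; the proofs are below) =====
def Claim_equal_get_path_prefix : Prop := ∀ (path : String), Dom_get_path_prefix path → Spec_get_path_prefix path (get_path_prefix path)

-- ===== LEMMAS AND PROOFS =====
theorem gppTokens_ne_nil (l : List Char) : gppTokens l ≠ [] := by
  cases l with
  | nil => simp [gppTokens]
  | cons c rest =>
    simp only [gppTokens]
    split
    · simp
    · cases h : gppTokens rest <;> simp

theorem mk_append_singleton (xs : List Char) (c : Char) :
    String.ofList xs ++ String.singleton c = String.ofList (xs ++ [c]) := by
  have : String.singleton c = String.ofList [c] := rfl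
  rw [this, ← String.ofList_append]

theorem gppLoop_eq (l : List Char) : ∀ (k : Nat) (p : List Char), k ≤ 2 →
    gppLoop l k (String.ofList p) = String.ofList (p ++ ((gppTokens l).take (5 - 2*k)).flatten) := by
  induction l with
  | nil =>
    intro k p hk
    obtain ⟨m, hm⟩ : ∃ m, 5 - 2*k = m + 1 := ⟨4 - 2*k, by omega⟩
    simp [gppLoop, gppTokens, hm]
  | cons c rest ih =>
    intro k p hk
    by_cases hc : c = '/' ∨ c = '\\'
    · simp only [gppLoop, gppTokens, hc, if_pos]
      by_cases h3 : k + 1 = 3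
      · have hk2 : k = 2 := by omega
        subst hk2
        simp [h3]
      · have hk1 : k ≤ 1 := by omega
        rw [if_neg (by simp [h3])]
        rw [mk_append_singleton, ih (k+1) (p ++ [c]) (by omega)]
        have htake : 5 - 2*k = (5 - 2*(k+1)) + 2 := by omega
        rw [htake]
        simp [List.take_succ_cons]
    · simp only [gppLoop, gppTokens, hc, if_false]
      rw [if_neg (by simp), mk_append_singleton, ih k (p ++ [c]) hk]
      cases h : gppTokens rest with
      | nil => exact absurd h (gppTokens_ne_nil rest)
      | cons t ts =>
        have h5 : ∃ m, 5 - 2*k = m + 1 := ⟨4 - 2*k, by omega⟩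
        obtain ⟨m, hm⟩ := h5
        simp [hm, List.take_succ_cons]

-- ===== VERDICT (by name: the statement is the Claim_ definition above) =====
theorem get_path_prefix_spec : Claim_equal_get_path_prefix := by
  intro path _
  unfold Spec_get_path_prefix get_path_prefix get_path_prefix_alt
  have := gppLoop_eq path.toList 0 [] (by omega)
  simpa using this
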